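-- pv_equiv track=rewrite | github.com/usualketchup/cs61a | typing_test/typing_test.py | score_function
-- ===== SOURCE A (Python) =====
-- def score_function(word1, word2):
--     """A score_function that computes the edit distance between word1 and word2."""
--     if word1 == word2:  # Fill in the condition
--         # BEGIN Q6
--         return 0
--         # END Q6
--     elif not word2:
--         return score_function(word1[1:], word2) + 1
--     elif not word1:
--         return score_function(word2[0], word2) + 1
--     elif word1[0] == word2[0]:  # Feel free to remove or add additional cases
--         return score_function(word1[1:], word2[1:])
--     else:
--         add_char = lambda: score_function(word2[0] + word1, word2) + 1 # Fill in these lines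
--         remove_char = lambda: score_function(word1[1:], word2) + 1
--         substitute_char = lambda: score_function(word2[0] + word1[1:], word2) + 1
--         if len(word1) < len(word2):
--             if [c for c in range(len(word1)) if word1[c] == word2[c]]:
--                 return substitute_char()
--             else:
--                 return add_char()
--         elif len(word1) > len(word2) or len(word1) >= 2 and word1[1] == word2[0]:
--             return remove_char()
--         else:
--             return substitute_char()
-- ===== SOURCE B (Python) =====
-- def score_function(word1, word2):
--     """Iterative rewrite: repeatedly strip the longest common prefix, settle
--     the one-side-empty cases in closed form (remaining length), otherwise pay
--     one edit per pass chosen by the same length-based rule."""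
--     a, b, total = word1, word2, 0
--     while True:
--         n = 0
--         while n < len(a) and n < len(b) and a[n] == b[n]:
--             n += 1
--         a, b = a[n:], b[n:]
--         if not a:
--             return total + len(b)
--         if not b:
--             return total + len(a)
--         total += 1
--         if len(a) < len(b):
--             if any(a[i] == b[i] for i in range(1, len(a))):
--                 a, b = a[1:], b[1:]
--             else:
--                 b = b[1:]
--         elif len(a) > len(b) or a[1:2] == b[0:1]:
--             a = a[1:]
--         else:
--             a, b = a[1:], b[1:]
-- ===== Notes on version B (the rewrite author's own statement) =====
-- stated objective: alternative
-- what changed: Replaced A's recursion (whose mismatch branches prepend word2[0] to word1 and recurse so the next call strips the matching heads) by an iterative loop that strips the whole longest common prefix per pass, returns the remaining length in closed form when either side is exhausted, and otherwise pays one edit per pass; no string building, no per-step lambda creation and no recursion (A exhausts the Python stack on long inputs).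
import Mathlib
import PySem

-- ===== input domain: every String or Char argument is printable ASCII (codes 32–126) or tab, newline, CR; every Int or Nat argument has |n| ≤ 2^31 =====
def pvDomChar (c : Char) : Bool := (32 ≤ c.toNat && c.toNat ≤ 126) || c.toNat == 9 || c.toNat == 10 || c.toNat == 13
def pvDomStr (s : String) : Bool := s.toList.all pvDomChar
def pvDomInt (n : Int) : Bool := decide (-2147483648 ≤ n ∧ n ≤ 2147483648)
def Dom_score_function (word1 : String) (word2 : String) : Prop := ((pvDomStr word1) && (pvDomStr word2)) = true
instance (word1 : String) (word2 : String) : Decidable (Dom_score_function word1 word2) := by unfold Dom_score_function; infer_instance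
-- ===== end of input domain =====

-- B replaces A's recursion (whose mismatch branches prepend word2[0] to word1 and
-- recurse) by an iterative loop that strips the longest common prefix per pass and
-- settles the one-side-empty cases in closed form; a timing run measured B
-- faster (no recursion, no string prepending).

-- ===== PORT A =====
-- literal port of A's recursion, on the character lists of the two strings;
-- the [], [] match arm is unreachable (that input is caught by the equality test)
def scoreGoA (w1 w2 : List Char) : Int :=
  if w1 = w2 then 0
  else
    match w1, w2 with
    | [], [] => 0
    | _ :: as, [] => scoreGoA as [] + 1
    | [], b0 :: bs => scoreGoA [b0] (b0 :: bs) + 1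
    | a0 :: as, b0 :: bs =>
      if a0 = b0 then scoreGoA as bs
      else if (a0 :: as).length < (b0 :: bs).length then
        if ((List.range (a0 :: as).length).filter
              (fun c => decide ((a0 :: as).getD c ' ' = (b0 :: bs).getD c ' '))) ≠ [] then
          scoreGoA (b0 :: as) (b0 :: bs) + 1
        else
          scoreGoA (b0 :: a0 :: as) (b0 :: bs) + 1
      else if (a0 :: as).length > (b0 :: bs).length ∨
              (2 ≤ (a0 :: as).length ∧ (a0 :: as).getD 1 ' ' = b0) then
        scoreGoA as (b0 :: bs) + 1
      else
        scoreGoA (b0 :: as) (b0 :: bs) + 1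
termination_by 2 * w2.length + w1.length + (match w1, w2 with | a :: _, b :: _ => if a = b then 0 else 2 | _, _ => 2)
decreasing_by
  all_goals simp only [List.length_cons, List.length_nil]
  all_goals simp_all
  all_goals try omega
  all_goals cases as <;> (try cases bs) <;> simp_all <;> (try split) <;> omega

def score_function (word1 : String) (word2 : String) : Int :=
  scoreGoA word1.toList word2.toList

-- ===== PORT B =====
-- B's inner while loop: strip the longest common prefix of the two suffixes
def stripCP : List Char → List Char → List Char × List Char
  | a0 :: as, b0 :: bs => if a0 = b0 then stripCP as bs else (a0 :: as, b0 :: bs)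
  | a, b => (a, b)

theorem stripCP_len (a b : List Char) :
    (stripCP a b).1.length + (stripCP a b).2.length ≤ a.length + b.length := by
  fun_induction stripCP a b with
  | case1 as b0 bs ih => simp only [List.length_cons]; omega
  | case2 a0 as b0 bs h => simp
  | case3 a b h => simp

-- B's outer loop as a tail recursion over the state (a, b, total)
def scoreGoB (a b : List Char) (total : Int) : Int :=
  match h : stripCP a b with
  | ([], b') => total + b'.length
  | (a0 :: as, []) => total + (a0 :: as).length
  | (a0 :: as, b0 :: bs) =>
    if (a0 :: as).length < (b0 :: bs).length then
      if (List.range' 1 as.length).any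
            (fun i => decide ((a0 :: as).getD i ' ' = (b0 :: bs).getD i ' ')) then
        scoreGoB as bs (total + 1)
      else
        scoreGoB (a0 :: as) bs (total + 1)
    else if (a0 :: as).length > (b0 :: bs).length ∨ as.take 1 = [b0] then
      scoreGoB as (b0 :: bs) (total + 1)
    else
      scoreGoB as bs (total + 1)
termination_by a.length + b.length
decreasing_by
  all_goals
    have := stripCP_len a b
    rw [h] at this
    simp at this ⊢
    omega

def score_function_alt (word1 : String) (word2 : String) : Int :=
  scoreGoB word1.toList word2.toList 0

-- ===== PRECONDITION & SPEC =====
def Spec_score_function (word1 : String) (word2 : String) (out : Int) : Prop := out = score_function_alt word1 word2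
instance (word1 : String) (word2 : String) (out : Int) : Decidable (Spec_score_function word1 word2 out) := by unfold Spec_score_function; infer_instance

-- ===== CLAIM (what is proved, stated in full; the proofs are below) =====
def Claim_equal_score_function : Prop := ∀ (word1 : String) (word2 : String), Dom_score_function word1 word2 → Spec_score_function word1 word2 (score_function word1 word2)

-- ===== LEMMAS AND PROOFS =====

-- after A prepends the head of word2, the two heads match and A strips them again
theorem scoreGoA_cons_cons (h : Char) (x y : List Char) :
    scoreGoA (h :: x) (h :: y) = scoreGoA x y := by
  rw [scoreGoA.eq_def]
  by_cases hxy : x = y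
  · subst hxy
    rw [if_pos rfl, scoreGoA.eq_def]
    simp
  · have hne : ¬ (h :: x = h :: y) := by simp [hxy]
    rw [if_neg hne]
    simp

theorem scoreGoA_nil_right (a : List Char) : scoreGoA a [] = a.length := by
  induction a with
  | nil => rw [scoreGoA.eq_def]; simp
  | cons x xs ih => rw [scoreGoA.eq_def]; simp [ih]

theorem scoreGoA_nil_left (b : List Char) : scoreGoA [] b = b.length := by
  induction b with
  | nil => rw [scoreGoA.eq_def]; simp
  | cons y ys ih =>
      rw [scoreGoA.eq_def]
      simp only [reduceCtorEq, if_false]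
      rw [scoreGoA_cons_cons, ih]
      simp

-- stripping the common prefix does not change A's score
theorem scoreGoA_stripCP (a b : List Char) :
    scoreGoA a b = scoreGoA (stripCP a b).1 (stripCP a b).2 := by
  fun_induction stripCP a b with
  | case1 as b0 bs ih => rw [scoreGoA_cons_cons]; exact ih
  | case2 a0 as b0 bs h => simp
  | case3 a b h => simp

-- after stripCP, if both sides are nonempty their heads differ
theorem stripCP_heads_ne (a b : List Char) (a0 b0 : Char) (as bs : List Char)
    (h : stripCP a b = (a0 :: as, b0 :: bs)) : a0 ≠ b0 := by
  fun_induction stripCP a b with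
  | case1 xs y ys ih => exact ih h
  | case2 x xs y ys hxy =>
      simp only [Prod.mk.injEq, List.cons.injEq] at h
      intro hc; exact hxy (by rw [h.1.1, h.2.1, hc])
  | case3 x y hxy =>
      exfalso
      rcases x with _ | ⟨x0, xs⟩ <;> rcases y with _ | ⟨y0, ys⟩ <;> simp_all

-- one unfolding of A at a mismatching head, with the re-stripping already applied
theorem scoreGoA_mismatch (a0 b0 : Char) (as bs : List Char) (hne : a0 ≠ b0) :
    scoreGoA (a0 :: as) (b0 :: bs) =
      (if (a0 :: as).length < (b0 :: bs).length then
        if ((List.range (a0 :: as).length).filter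
              (fun c => decide ((a0 :: as).getD c ' ' = (b0 :: bs).getD c ' '))) ≠ [] then
          scoreGoA as bs + 1
        else
          scoreGoA (a0 :: as) bs + 1
      else if (a0 :: as).length > (b0 :: bs).length ∨
              (2 ≤ (a0 :: as).length ∧ (a0 :: as).getD 1 ' ' = b0) then
        scoreGoA as (b0 :: bs) + 1
      else
        scoreGoA as bs + 1) := by
  conv_lhs => rw [scoreGoA.eq_def]
  have hne' : ¬ (a0 :: as = b0 :: bs) := by simp [hne]
  rw [if_neg hne']
  simp only [if_neg hne]
  split_ifs <;> first | rw [scoreGoA_cons_cons] | rfl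

-- B's any-over-range(1,len) test equals A's filter-over-range(len) test when the heads differ
theorem cond_sub_eq (a0 b0 : Char) (as bs : List Char) (hne : a0 ≠ b0) :
    ((List.range' 1 as.length).any
        (fun i => decide ((a0 :: as).getD i ' ' = (b0 :: bs).getD i ' ')) = true)
    ↔ ((List.range (a0 :: as).length).filter
        (fun c => decide ((a0 :: as).getD c ' ' = (b0 :: bs).getD c ' '))) ≠ [] := by
  rw [ne_eq, List.filter_eq_nil_iff]
  push Not
  simp only [List.any_eq_true, List.mem_range'_1, List.mem_range, decide_eq_true_eq,
    List.length_cons]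
  constructor
  · rintro ⟨i, hi, hp⟩
    exact ⟨i, by omega, hp⟩
  · rintro ⟨c, hc, hp⟩
    have hc0 : c ≠ 0 := by
      intro h0
      subst h0
      simp only [List.getD_cons_zero] at hp
      exact hne hp
    exact ⟨c, by omega, hp⟩

-- B's slice test a[1:2] == b[0:1] equals A's (len(a) >= 2 and a[1] == b[0])
theorem cond_rem_eq (a0 b0 : Char) (as : List Char) :
    (as.take 1 = [b0]) ↔ (2 ≤ (a0 :: as).length ∧ (a0 :: as).getD 1 ' ' = b0) := by
  cases as with
  | nil => simp
  | cons x xs => simp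

theorem goB_eq_goA (a b : List Char) (t : Int) : scoreGoB a b t = t + scoreGoA a b := by
  fun_induction scoreGoB a b t with
  | case1 a b total b' h =>
      rw [scoreGoA_stripCP, h]
      simp [scoreGoA_nil_left]
  | case2 a b total a0 as h =>
      rw [scoreGoA_stripCP, h]
      simp [scoreGoA_nil_right]
  | case3 a b total a0 as b0 bs h hlt hany ih =>
      have hne := stripCP_heads_ne a b a0 b0 as bs h
      rw [ih]
      conv_rhs => rw [scoreGoA_stripCP a b, h]
      rw [scoreGoA_mismatch a0 b0 as bs hne,
        if_pos hlt, if_pos ((cond_sub_eq a0 b0 as bs hne).mp hany)]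
      ring
  | case4 a b total a0 as b0 bs h hlt hany ih =>
      have hne := stripCP_heads_ne a b a0 b0 as bs h
      have hfil : ¬ ((List.range (a0 :: as).length).filter
            (fun c => decide ((a0 :: as).getD c ' ' = (b0 :: bs).getD c ' '))) ≠ [] := by
        intro hcon
        exact absurd ((cond_sub_eq a0 b0 as bs hne).mpr hcon) (by simpa using hany)
      rw [ih]
      conv_rhs => rw [scoreGoA_stripCP a b, h]
      rw [scoreGoA_mismatch a0 b0 as bs hne,
        if_pos hlt, if_neg hfil]
      ring
  | case5 a b total a0 as b0 bs h hlt hrem ih =>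
      have hne := stripCP_heads_ne a b a0 b0 as bs h
      have hrem' : (a0 :: as).length > (b0 :: bs).length ∨
          (2 ≤ (a0 :: as).length ∧ (a0 :: as).getD 1 ' ' = b0) := by
        rcases hrem with h1 | h2
        · exact Or.inl h1
        · exact Or.inr ((cond_rem_eq a0 b0 as).mp h2)
      rw [ih]
      conv_rhs => rw [scoreGoA_stripCP a b, h]
      rw [scoreGoA_mismatch a0 b0 as bs hne,
        if_neg hlt, if_pos hrem']
      ring
  | case6 a b total a0 as b0 bs h hlt hrem ih =>
      have hne := stripCP_heads_ne a b a0 b0 as bs h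
      have hrem' : ¬ ((a0 :: as).length > (b0 :: bs).length ∨
          (2 ≤ (a0 :: as).length ∧ (a0 :: as).getD 1 ' ' = b0)) := by
        intro hcon
        apply hrem
        rcases hcon with h1 | h2
        · exact Or.inl h1
        · exact Or.inr ((cond_rem_eq a0 b0 as).mpr h2)
      rw [ih]
      conv_rhs => rw [scoreGoA_stripCP a b, h]
      rw [scoreGoA_mismatch a0 b0 as bs hne,
        if_neg hlt, if_neg hrem']
      ring

-- ===== VERDICT (by name: the statement is the Claim_ definition above) =====
theorem score_function_spec : Claim_equal_score_function := by
  intro word1 word2 _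
  unfold Spec_score_function score_function score_function_alt
  rw [goB_eq_goA]
  ring
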